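-- pv_equiv track=rewrite | github.com/OrionJoshi/Competitive_Programming | 25.Concatenation of Array/Method-2.py | concatArray
-- ===== SOURCE A (Python) =====
-- def concatArray(lst):
--     resultList = []
--     lengthOfList = len(lst)
--
--     for i in range(0, 2 * lengthOfList):
--         if i >= lengthOfList:
--             resultList.append(lst[i - lengthOfList])
--         else:
--             resultList.append(lst[i])
--     return resultList
-- ===== SOURCE B (Python) =====
-- def concatArray(lst):
--     result = []
--     for x in lst:
--         result.append(x)
--     for x in lst:
--         result.append(x)
--     return result
-- ===== Notes on version B (the rewrite author's own statement) =====
-- stated objective: simpler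
-- what changed: Replaces the single indexed loop over range(2*len) with its i>=len branch and modular index arithmetic by two plain element-iteration passes that append each element directly.
import Mathlib
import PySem

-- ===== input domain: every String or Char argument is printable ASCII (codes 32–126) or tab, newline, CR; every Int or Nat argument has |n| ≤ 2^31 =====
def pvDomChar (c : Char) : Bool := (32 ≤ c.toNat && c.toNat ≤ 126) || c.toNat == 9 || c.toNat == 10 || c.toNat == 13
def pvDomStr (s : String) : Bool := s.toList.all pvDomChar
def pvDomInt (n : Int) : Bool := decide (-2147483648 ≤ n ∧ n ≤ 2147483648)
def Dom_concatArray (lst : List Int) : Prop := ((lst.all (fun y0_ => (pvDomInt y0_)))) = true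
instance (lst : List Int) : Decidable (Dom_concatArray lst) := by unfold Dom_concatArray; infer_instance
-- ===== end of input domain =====

-- B replaces A's single loop over range(2*len) with a branch on i >= len by two plain
-- element-iteration passes appending each element (objective: simpler).

-- ===== PORT A =====
-- Python's lst[i] / lst[i - len]: both indices are always in range here (0 ≤ i < 2*len and the
-- branch guard), so pyGetD with an unused default is exact.
def concatArray (lst : List Int) : List Int :=
  (PySem.List.pyRange 0 (2 * PySem.List.len lst) 1).foldl
    (fun resultList i =>
      if i ≥ PySem.List.len lst then
        resultList ++ [PySem.List.pyGetD lst (i - PySem.List.len lst) 0]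
      else
        resultList ++ [PySem.List.pyGetD lst i 0]) []

-- ===== PORT B =====
def concatArray_alt (lst : List Int) : List Int :=
  let result := lst.foldl (fun result x => result ++ [x]) []
  lst.foldl (fun result x => result ++ [x]) result

-- ===== PRECONDITION & SPEC =====
def Spec_concatArray (lst : List Int) (out : List Int) : Prop := out = concatArray_alt lst
instance (lst : List Int) (out : List Int) : Decidable (Spec_concatArray lst out) := by unfold Spec_concatArray; infer_instance

-- ===== CLAIM (what is proved, stated in full; the proofs are below) =====
def Claim_equal_concatArray : Prop := ∀ (lst : List Int), Dom_concatArray lst → Spec_concatArray lst (concatArray lst)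

-- ===== LEMMAS AND PROOFS =====

-- Both programs build lst ++ lst.
lemma concatArray_alt_eq (lst : List Int) : concatArray_alt lst = lst ++ lst := by
  unfold concatArray_alt
  rw [PySem.List.foldl_append_singleton, PySem.List.foldl_append_singleton]
  simp

lemma concatArray_eq (lst : List Int) : concatArray lst = lst ++ lst := by
  unfold concatArray
  have hsplit : PySem.List.pyRange 0 (2 * PySem.List.len lst) 1 =
      PySem.List.pyRange 0 (PySem.List.len lst) 1 ++
      PySem.List.pyRange (PySem.List.len lst) (2 * PySem.List.len lst) 1 := by
    refine PySem.List.pyRange_one_append 0 (PySem.List.len lst) (2 * PySem.List.len lst) ?_ ?_ <;>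
      simp [PySem.List.len]
    omega
  rw [hsplit, List.foldl_append]
  have h1 : (PySem.List.pyRange 0 (PySem.List.len lst) 1).foldl
      (fun resultList i =>
        if i ≥ PySem.List.len lst then
          resultList ++ [PySem.List.pyGetD lst (i - PySem.List.len lst) 0]
        else
          resultList ++ [PySem.List.pyGetD lst i 0]) [] = lst := by
    rw [PySem.List.foldl_congr_mem
      (g := fun resultList i => resultList ++ [PySem.List.pyGetD lst i 0])]
    · rw [PySem.List.foldl_pyRange_zero_pyGetD lst 0 (fun acc x => acc ++ [x]) []]
      rw [PySem.List.foldl_append_singleton]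
      simp
    · intro acc i hi
      have := (PySem.List.mem_pyRange_one).1 hi
      simp [PySem.List.len] at this ⊢
      omega
  rw [h1]
  -- second pass: shift indices down by len
  have h2 : ∀ (k : Nat) (a : Int) (init : List Int), 0 ≤ a → a + k = PySem.List.len lst →
      (PySem.List.pyRange (PySem.List.len lst + a) (2 * PySem.List.len lst) 1).foldl
        (fun resultList i =>
          if i ≥ PySem.List.len lst then
            resultList ++ [PySem.List.pyGetD lst (i - PySem.List.len lst) 0]
          else
            resultList ++ [PySem.List.pyGetD lst i 0]) init
      = init ++ lst.drop a.toNat := by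
    intro k
    induction k with
    | zero =>
      intro a init ha hk
      have hnil : PySem.List.pyRange (PySem.List.len lst + a) (2 * PySem.List.len lst) 1 = [] :=
        PySem.List.pyRange_one_eq_nil (by simp [PySem.List.len] at hk ⊢; omega)
      have : a.toNat = lst.length := by simp [PySem.List.len] at hk; omega
      rw [hnil, List.foldl_nil]
      simp [this]
    | succ m ih =>
      intro a init ha hk
      have hlen : (PySem.List.len lst : Int) = lst.length := by simp [PySem.List.len]
      have hcons : PySem.List.pyRange (PySem.List.len lst + a) (2 * PySem.List.len lst) 1 =
          (PySem.List.len lst + a) :: PySem.List.pyRange (PySem.List.len lst + a + 1) (2 * PySem.List.len lst) 1 :=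
        PySem.List.pyRange_one_cons (by rw [hlen] at hk ⊢; omega)
      rw [hcons, List.foldl_cons]
      have hge : PySem.List.len lst + a ≥ PySem.List.len lst := by omega
      rw [if_pos hge]
      have harg : PySem.List.len lst + a - PySem.List.len lst = a := by ring
      have hstep : PySem.List.len lst + a + 1 = PySem.List.len lst + (a + 1) := by ring
      rw [harg, hstep, ih (a + 1) _ (by omega) (by rw [hlen] at hk ⊢; omega)]
      have hlt : a.toNat < lst.length := by rw [hlen] at hk; omega
      rw [PySem.List.pyGetD_of_nonneg lst 0 ha]
      rw [List.getD_eq_getElem _ _ hlt]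
      have hto : (a + 1).toNat = a.toNat + 1 := by omega
      have hdrop : lst.drop a.toNat = lst[a.toNat] :: lst.drop (a + 1).toNat := by
        rw [hto, List.drop_eq_getElem_cons hlt]
      rw [hdrop]
      simp
  have := h2 lst.length 0 lst (le_refl 0) (by simp [PySem.List.len])
  simpa using this

-- ===== VERDICT (by name: the statement is the Claim_ definition above) =====
theorem concatArray_spec : Claim_equal_concatArray := by
  intro lst _
  unfold Spec_concatArray
  rw [concatArray_eq, concatArray_alt_eq]
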